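-- pv_equiv track=rewrite | github.com/vjlglopez/PDS_Exer_I | HW_II.py | is_interlock
-- ===== SOURCE A (Python) =====
-- def is_interlock(word_list, word1, word2):
--     '''
--     Check if word1 and word2 interlocks based on word_list
--
--     Two words "interlock" if taking alternating letters from each forms a new
--     word. For example, "shoe" and "cold" interlock to form "schooled".
--
--
--     Parameters
--     ----------
--     word_list : list
--         List of valid words
--     word1 : string
--         First word to check
--     word2 : string
--         Other word to check
--
--
--     Returns
--     -------
--     interlockness : bool
--         True if `word1` and `word2` interlock
--     '''
--     if len(word1) != len(word2):
--         return False
--     else: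
--         i =0
--         interlock1 = ''
--         interlock2 = ''
--         for i in range(len(word1)):
--             interlock1 += word1[i] + word2[i]
--
--         for i in range(len(word2)):
--             interlock2 += word2[i] + word1[i]
--
--         if interlock1 in word_list or interlock2 in word_list:
--             return True
--         else:
--             return False
-- ===== SOURCE B (Python) =====
-- def is_interlock(word_list, word1, word2):
--     if len(word1) != len(word2):
--         return False
--     n = len(word1)
--     for w in word_list:
--         if isinstance(w, str) and len(w) == 2 * n:
--             a, b = w[0::2], w[1::2]
--             if (a == word1 and b == word2) or (a == word2 and b == word1):
--                 return True
--     return False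
-- ===== Notes on version B (the rewrite author's own statement) =====
-- stated objective: faster
-- what changed: Instead of building the two interleaved strings and testing list membership, B scans word_list once and de-interleaves each candidate (even/odd position slices), comparing against word1/word2 in both orders and returning on the first match; most candidates are rejected by a cheap length check without any string construction.
import Mathlib
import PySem

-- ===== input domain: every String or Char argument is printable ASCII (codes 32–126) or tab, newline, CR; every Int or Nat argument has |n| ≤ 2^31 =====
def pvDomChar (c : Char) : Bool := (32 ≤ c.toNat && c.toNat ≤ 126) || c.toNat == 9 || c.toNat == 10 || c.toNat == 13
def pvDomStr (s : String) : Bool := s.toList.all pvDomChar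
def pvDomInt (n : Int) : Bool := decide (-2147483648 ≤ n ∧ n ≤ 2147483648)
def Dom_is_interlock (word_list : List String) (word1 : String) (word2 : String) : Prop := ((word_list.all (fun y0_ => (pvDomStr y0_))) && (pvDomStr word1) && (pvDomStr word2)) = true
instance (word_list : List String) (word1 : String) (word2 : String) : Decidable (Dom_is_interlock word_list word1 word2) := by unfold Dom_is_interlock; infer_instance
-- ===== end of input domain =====

-- B de-interleaves each list entry (even/odd positions) instead of constructing the two
-- interleaved strings and testing membership; an alternative single-scan decomposition.


-- ===== PORT A =====
-- strings are handled as their List Char contents; word1[i] is in range, so pyGetD is exact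
def is_interlock (word_list : List String) (word1 : String) (word2 : String) : Bool :=
  if PySem.Str.len word1 ≠ PySem.Str.len word2 then false
  else
    let interlock1 : List Char :=
      (PySem.List.pyRange 0 (PySem.Str.len word1) 1).foldl
        (fun acc i => acc ++ [PySem.List.pyGetD word1.toList i ' ', PySem.List.pyGetD word2.toList i ' ']) []
    let interlock2 : List Char :=
      (PySem.List.pyRange 0 (PySem.Str.len word2) 1).foldl
        (fun acc i => acc ++ [PySem.List.pyGetD word2.toList i ' ', PySem.List.pyGetD word1.toList i ' ']) []
    if word_list.any (fun w => w.toList == interlock1) || word_list.any (fun w => w.toList == interlock2) then true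
    else false

-- ===== PORT B =====
-- hand port of the step-2 slice: evens l = l[0::2]; l[1::2] is evens l.tail (exact for step 2)
def evens {α : Type} : List α → List α
  | [] => []
  | [a] => [a]
  | a :: _ :: r => a :: evens r

def is_interlock_alt (word_list : List String) (word1 : String) (word2 : String) : Bool :=
  if PySem.Str.len word1 ≠ PySem.Str.len word2 then false
  else
    -- for w in word_list: if len(w) == 2*n and the de-interleave matches, return True
    word_list.any (fun w =>
      PySem.Str.len w == 2 * PySem.Str.len word1 &&
        (let a := evens w.toList
         let b := evens w.toList.tail
         (a == word1.toList && b == word2.toList) || (a == word2.toList && b == word1.toList)))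

-- ===== PRECONDITION & SPEC =====
def Spec_is_interlock (word_list : List String) (word1 : String) (word2 : String) (out : Bool) : Prop := out = is_interlock_alt word_list word1 word2
instance (word_list : List String) (word1 : String) (word2 : String) (out : Bool) : Decidable (Spec_is_interlock word_list word1 word2 out) := by unfold Spec_is_interlock; infer_instance

-- ===== CLAIM (what is proved, stated in full; the proofs are below) =====
def Claim_equal_is_interlock : Prop := ∀ (word_list : List String) (word1 : String) (word2 : String), Dom_is_interlock word_list word1 word2 → Spec_is_interlock word_list word1 word2 (is_interlock word_list word1 word2)

-- ===== LEMMAS AND PROOFS =====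

-- reference interleaving (proof-only)
def ilv {α : Type} : List α → List α → List α
  | a :: as, b :: bs => a :: b :: ilv as bs
  | _, _ => []

theorem evens_cons {α : Type} (b : α) (t : List α) : evens (b :: t) = b :: evens t.tail := by
  cases t <;> rfl

theorem length_ilv {α : Type} (c1 c2 : List α) (h : c1.length = c2.length) :
    (ilv c1 c2).length = 2 * c1.length := by
  induction c1 generalizing c2 with
  | nil => cases c2 <;> simp_all [ilv]
  | cons a as ih =>
    cases c2 with
    | nil => simp at h
    | cons b bs =>
      simp [ilv, ih bs (by simpa using h)]
      omega

theorem evens_ilv {α : Type} (c1 c2 : List α) (h : c1.length = c2.length) :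
    evens (ilv c1 c2) = c1 ∧ evens (ilv c1 c2).tail = c2 := by
  induction c1 generalizing c2 with
  | nil => cases c2 <;> simp_all [ilv, evens]
  | cons a as ih =>
    cases c2 with
    | nil => simp at h
    | cons b bs =>
      obtain ⟨ih1, ih2⟩ := ih bs (by simpa using h)
      constructor
      · show evens (a :: b :: ilv as bs) = a :: as
        rw [evens_cons]
        simpa using congrArg (a :: ·) ih1
      · show evens (b :: ilv as bs) = b :: bs
        rw [evens_cons]
        simpa using congrArg (b :: ·) ih2

theorem ilv_evens {α : Type} (w : List α) (h : w.length % 2 = 0) :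
    ilv (evens w) (evens w.tail) = w := by
  induction w using evens.induct with
  | case1 => rfl
  | case2 a => simp at h
  | case3 a b r ih =>
    simp only [List.tail_cons, evens_cons]
    show ilv (a :: evens r) (b :: evens r.tail) = a :: b :: r
    simp only [ilv]
    rw [ih (by simp only [List.length_cons] at h; omega)]

theorem eq_ilv_iff {α : Type} (w c1 c2 : List α) (h : c1.length = c2.length) :
    w = ilv c1 c2 ↔ (w.length = 2 * c1.length ∧ evens w = c1 ∧ evens w.tail = c2) := by
  constructor
  · rintro rfl
    exact ⟨length_ilv c1 c2 h, evens_ilv c1 c2 h⟩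
  · rintro ⟨hl, h1, h2⟩
    rw [← h1, ← h2, ilv_evens w (by omega)]

theorem foldl_ilv {α : Type} [Inhabited α] (d : α) :
    ∀ (c1 c2 acc : List α), c1.length = c2.length →
    (List.range c1.length).foldl (fun acc k => acc ++ [c1.getD k d, c2.getD k d]) acc = acc ++ ilv c1 c2 := by
  intro c1
  induction c1 with
  | nil => intro c2 acc h; cases c2 <;> simp_all [ilv]
  | cons a as ih =>
    intro c2 acc h
    cases c2 with
    | nil => simp at h
    | cons b bs =>
      rw [List.length_cons, List.range_succ_eq_map, List.foldl_cons, List.foldl_map]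
      simp only [List.getD_cons_zero, List.getD_cons_succ]
      rw [ih bs (acc ++ [a, b]) (by simpa using h)]
      simp [ilv]

-- A's foldl over pyRange builds exactly ilv
theorem pyfold_ilv (c1 c2 : List Char) (h : c1.length = c2.length) :
    (PySem.List.pyRange 0 (c1.length : Int) 1).foldl
      (fun acc i => acc ++ [PySem.List.pyGetD c1 i ' ', PySem.List.pyGetD c2 i ' ']) [] = ilv c1 c2 := by
  rw [PySem.List.pyRange_one, List.foldl_map]
  simp only [sub_zero, Int.toNat_natCast, zero_add, PySem.List.pyGetD_natCast]
  simpa using foldl_ilv ' ' c1 c2 [] h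

-- ===== VERDICT (by name: the statement is the Claim_ definition above) =====
theorem any_or_distrib {α : Type} (l : List α) (p q : α → Bool) :
    (l.any fun x => p x || q x) = (l.any p || l.any q) := by
  rw [Bool.eq_iff_iff]
  simp only [List.any_eq_true, Bool.or_eq_true]
  exact ⟨fun ⟨x, hx, hpq⟩ => hpq.elim (fun h => Or.inl ⟨x, hx, h⟩) (fun h => Or.inr ⟨x, hx, h⟩),
    fun h => h.elim (fun ⟨x, hx, hp⟩ => ⟨x, hx, Or.inl hp⟩) (fun ⟨x, hx, hq⟩ => ⟨x, hx, Or.inr hq⟩)⟩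

theorem point_iff (c1 c2 cw : List Char) (h : c1.length = c2.length) :
    (cw = ilv c1 c2 ∨ cw = ilv c2 c1) ↔
      (cw.length = 2 * c1.length ∧
        ((evens cw = c1 ∧ evens cw.tail = c2) ∨ (evens cw = c2 ∧ evens cw.tail = c1))) := by
  rw [eq_ilv_iff cw c1 c2 h, eq_ilv_iff cw c2 c1 h.symm, h]
  tauto

theorem is_interlock_spec : Claim_equal_is_interlock := by
  intro wl w1 w2 _
  show is_interlock wl w1 w2 = is_interlock_alt wl w1 w2
  unfold is_interlock is_interlock_alt
  by_cases hg : PySem.Str.len w1 ≠ PySem.Str.len w2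
  · rw [if_pos hg, if_pos hg]
  · rw [if_neg hg, if_neg hg]
    rw [not_not] at hg
    have hlen : w1.toList.length = w2.toList.length := by
      simpa [PySem.Str.len_eq] using hg
    have e1 : (PySem.List.pyRange 0 (PySem.Str.len w1) 1).foldl
        (fun acc i => acc ++ [PySem.List.pyGetD w1.toList i ' ', PySem.List.pyGetD w2.toList i ' ']) ([] : List Char) = ilv w1.toList w2.toList := by
      simpa [PySem.Str.len_eq] using pyfold_ilv w1.toList w2.toList hlen
    have e2 : (PySem.List.pyRange 0 (PySem.Str.len w2) 1).foldl
        (fun acc i => acc ++ [PySem.List.pyGetD w2.toList i ' ', PySem.List.pyGetD w1.toList i ' ']) ([] : List Char) = ilv w2.toList w1.toList := by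
      simpa [PySem.Str.len_eq] using pyfold_ilv w2.toList w1.toList hlen.symm
    simp only [e1, e2]
    rw [show ∀ b : Bool, (if b then true else false) = b from fun b => by cases b <;> rfl]
    rw [← any_or_distrib]
    refine congrArg wl.any (funext fun w => ?_)
    rw [Bool.eq_iff_iff]
    simp only [Bool.or_eq_true, Bool.and_eq_true, beq_iff_eq, PySem.Str.len_eq]
    rw [point_iff w1.toList w2.toList w.toList hlen]
    constructor
    · rintro ⟨hl, hrest⟩
      exact ⟨by exact_mod_cast hl, hrest⟩
    · rintro ⟨hl, hrest⟩
      exact ⟨by exact_mod_cast hl, hrest⟩
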